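-- pv_equiv track=rewrite | github.com/AyudaEnPython/Soluciones | ejercicios/sucesion_ceros_unos.py | sucesion
-- ===== SOURCE A (Python) =====
-- def sucesion(n: int) -> str:
--     """
--     >>> sucesion(5)
--     '0, 1, 00, 11, 000'
--     """
--     ns = []
--     j = 0
--     for i in range(1, n+1):
--         if i % 2 != 0:
--             j += 1
--             s = "0" * j
--             ns.append(s)
--         else:
--             ns.append(s.replace("0", "1"))
--     return ", ".join(ns)
-- ===== SOURCE B (Python) =====
-- def sucesion(n: int) -> str:
--     if n <= 0:
--         return ""
--     pairs = []
--     for j in range(1, n // 2 + 2):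
--         pairs.append("0" * j)
--         pairs.append("1" * j)
--     return ", ".join(pairs[:n])
-- ===== Notes on version B (the rewrite author's own statement) =====
-- stated objective: alternative
-- what changed: B iterates over lengths j = 1..n//2+1 emitting the whole pair '0'*j, '1'*j per length into a list, then truncates the list to its first n terms and joins; A instead loops over term indices i = 1..n with threaded state (counter j, reuse of the previous string via .replace) deciding per index which kind of term to emit.
import Mathlib
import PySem

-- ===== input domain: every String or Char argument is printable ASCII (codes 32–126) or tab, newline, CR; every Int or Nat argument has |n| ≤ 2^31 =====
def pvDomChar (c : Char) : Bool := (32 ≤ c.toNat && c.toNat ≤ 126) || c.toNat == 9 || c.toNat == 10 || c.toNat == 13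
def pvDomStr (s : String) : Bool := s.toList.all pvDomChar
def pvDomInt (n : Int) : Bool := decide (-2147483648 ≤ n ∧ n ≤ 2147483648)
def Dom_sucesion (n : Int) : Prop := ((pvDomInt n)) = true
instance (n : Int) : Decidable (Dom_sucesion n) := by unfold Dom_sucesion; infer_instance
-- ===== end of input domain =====

-- B generates the terms in pairs per length j ('0'*j then '1'*j), truncates to the first n and joins,
-- instead of A's per-index loop with threaded state; objective: alternative.

-- ===== PORT A =====
-- loop body of A: state (ns, j, s); branches in A's order
def sucesionStep (st : List (List Char) × Int × List Char) (i : Int) :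
    List (List Char) × Int × List Char :=
  if PySem.Int.mod i 2 ≠ 0 then
    (st.1 ++ [PySem.List.pyRepeat ['0'] (st.2.1 + 1)], st.2.1 + 1,
     PySem.List.pyRepeat ['0'] (st.2.1 + 1))
  else
    (st.1 ++ [PySem.Chars.replace st.2.2 ['0'] ['1']], st.2.1, st.2.2)

def sucesion (n : Int) : String :=
  let r := (PySem.List.pyRange 1 (n + 1) 1).foldl sucesionStep ([], 0, [])
  String.ofList (PySem.Chars.join [',', ' '] r.1)

-- ===== PORT B =====
-- loop body of B: append the pair "0"*j, "1"*j for length j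
def sucesionPair (acc : List (List Char)) (j : Int) : List (List Char) :=
  acc ++ [PySem.List.pyRepeat ['0'] j] ++ [PySem.List.pyRepeat ['1'] j]

def sucesion_alt (n : Int) : String :=
  if n ≤ 0 then "" else
    let pairs := (PySem.List.pyRange 1 (PySem.Int.floordiv n 2 + 2) 1).foldl sucesionPair []
    String.ofList (PySem.Chars.join [',', ' '] (PySem.List.slice pairs none (some n)))

-- ===== PRECONDITION & SPEC =====
def Spec_sucesion (n : Int) (out : String) : Prop := out = sucesion_alt n
instance (n : Int) (out : String) : Decidable (Spec_sucesion n out) := by unfold Spec_sucesion; infer_instance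

-- ===== CLAIM (what is proved, stated in full; the proofs are below) =====
def Claim_equal_sucesion : Prop := ∀ (n : Int), Dom_sucesion n → Spec_sucesion n (sucesion n)

-- ===== LEMMAS AND PROOFS =====

-- proof-only characterisation of the i-th term of the sequence
def sucesionTerm (i : Int) : List Char :=
  PySem.List.pyRepeat [if PySem.Int.mod i 2 ≠ 0 then '0' else '1']
    (PySem.Int.floordiv (i + 1) 2)

theorem replace_go_replicate (fuel k : Nat) (acc : List Char) (hk : k ≤ fuel) :
    PySem.Chars.replace.go ['0'] ['1'] fuel (List.replicate k '0') acc
      = acc.reverse ++ List.replicate k '1' := by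
  induction fuel generalizing k acc with
  | zero =>
    interval_cases k
    simp [PySem.Chars.replace.go]
  | succ fuel ih =>
    cases k with
    | zero => simp [PySem.Chars.replace.go]
    | succ k =>
      rw [List.replicate_succ]
      simp only [PySem.Chars.replace.go]
      rw [if_pos (by simp [List.isPrefixOf])]
      simp only [List.length_cons, List.length_nil, List.drop_succ_cons, List.drop_zero,
        List.reverse_cons, List.reverse_nil, List.nil_append]
      rw [ih k (['1'] ++ acc) (by omega)]
      simp [List.replicate_succ]

theorem replace_replicate (k : Nat) :
    PySem.Chars.replace (List.replicate k '0') ['0'] ['1'] = List.replicate k '1' := by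
  rw [PySem.Chars.replace]
  simp only [List.isEmpty_cons, Bool.false_eq_true, if_false, List.length_replicate]
  simpa using replace_go_replicate k k [] le_rfl

theorem sucesion_loop (m : Nat) :
    (PySem.List.pyRange 1 ((m : Int) + 1) 1).foldl sucesionStep ([], 0, [])
      = ((PySem.List.pyRange 1 ((m : Int) + 1) 1).map sucesionTerm,
         (((m + 1) / 2 : Nat) : Int), List.replicate ((m + 1) / 2) '0') := by
  induction m with
  | zero =>
    rw [PySem.List.pyRange_one_eq_nil (by omega)]
    norm_num
  | succ m ih =>
    have hr : PySem.List.pyRange 1 ((↑(m + 1) : Int) + 1) 1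
        = PySem.List.pyRange 1 ((m : Int) + 1) 1 ++ [(m : Int) + 1] := by
      push_cast
      exact PySem.List.pyRange_one_succ_right (a := 1) (b := (m : Int) + 1) (by omega)
    rw [hr, List.foldl_append, ih, List.map_append, List.foldl_cons, List.foldl_nil,
      List.map_singleton]
    have hmod : PySem.Int.mod ((m : Int) + 1) 2 = (((m + 1) % 2 : Nat) : Int) := by
      have := PySem.Int.mod_natCast (m + 1) 2
      push_cast at this ⊢
      exact this
    have hfd : PySem.Int.floordiv ((m : Int) + 1 + 1) 2 = (((m + 2) / 2 : Nat) : Int) := by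
      have h2 : ((m : Int) + 1 + 1) = ((m + 2 : Nat) : Int) := by push_cast; ring
      rw [h2]
      exact_mod_cast PySem.Int.floordiv_natCast (m + 2) 2
    have hrep2 : PySem.List.pyRepeat ['0'] ((((m + 2) / 2 : Nat)) : Int)
        = List.replicate ((m + 2) / 2) '0' := by
      rw [PySem.List.pyRepeat_singleton, Int.toNat_natCast]
    rcases Nat.even_or_odd m with ⟨t, ht⟩ | ⟨t, ht⟩
    · -- m even, i = m+1 odd: the then-branch fires
      have h1 : (m + 1) % 2 = 1 := by omega
      have hjn : (m + 1) / 2 + 1 = (m + 2) / 2 := by omega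
      have hj : ((((m + 1) / 2 : Nat)) : Int) + 1 = (((m + 2) / 2 : Nat) : Int) := by
        exact_mod_cast hjn
      rw [sucesionStep, if_pos (by rw [hmod, h1]; decide)]
      dsimp only
      rw [sucesionTerm, if_pos (by rw [hmod, h1]; decide), hfd, hj, hrep2]
    · -- m odd, i = m+1 even: the else-branch fires
      have h1 : (m + 1) % 2 = 0 := by omega
      have hj : (((m + 2) / 2 : Nat)) = (((m + 1) / 2 : Nat)) := by omega
      rw [sucesionStep, if_neg (by rw [hmod, h1]; simp)]
      dsimp only
      rw [sucesionTerm, if_neg (by rw [hmod, h1]; simp), hfd, hj, replace_replicate]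
      rw [PySem.List.pyRepeat_singleton, Int.toNat_natCast]

theorem pairs_loop (J : Nat) :
    (PySem.List.pyRange 1 ((J : Int) + 1) 1).foldl sucesionPair []
      = (PySem.List.pyRange 1 (2 * (J : Int) + 1) 1).map sucesionTerm := by
  induction J with
  | zero =>
    rw [PySem.List.pyRange_one_eq_nil (by omega), PySem.List.pyRange_one_eq_nil (by omega)]
    rfl
  | succ J ih =>
    have hL : PySem.List.pyRange 1 ((↑(J + 1) : Int) + 1) 1
        = PySem.List.pyRange 1 ((J : Int) + 1) 1 ++ [(J : Int) + 1] := by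
      push_cast
      exact PySem.List.pyRange_one_succ_right (a := 1) (b := (J : Int) + 1) (by omega)
    have hR : PySem.List.pyRange 1 (2 * (↑(J + 1) : Int) + 1) 1
        = PySem.List.pyRange 1 (2 * (J : Int) + 1) 1 ++ [2 * (J : Int) + 1, 2 * (J : Int) + 2] := by
      push_cast
      rw [show (2 * ((J : Int) + 1) + 1) = (2 * (J : Int) + 2) + 1 by ring,
        PySem.List.pyRange_one_succ_right (a := 1) (b := 2 * (J : Int) + 2) (by omega),
        show (2 * (J : Int) + 2) = (2 * (J : Int) + 1) + 1 by ring,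
        PySem.List.pyRange_one_succ_right (a := 1) (b := 2 * (J : Int) + 1) (by omega)]
      simp
    rw [hL, List.foldl_append, ih, List.foldl_cons, List.foldl_nil, hR, List.map_append]
    have hmodO : PySem.Int.mod (2 * (J : Int) + 1) 2 = 1 := by
      have := PySem.Int.mod_natCast (2 * J + 1) 2
      have h1 : (2 * J + 1) % 2 = 1 := by omega
      rw [h1] at this
      push_cast at this ⊢
      exact this
    have hmodE : PySem.Int.mod (2 * (J : Int) + 2) 2 = 0 := by
      have := PySem.Int.mod_natCast (2 * J + 2) 2
      have h1 : (2 * J + 2) % 2 = 0 := by omega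
      rw [h1] at this
      push_cast at this ⊢
      exact this
    have hfdO : PySem.Int.floordiv (2 * (J : Int) + 1 + 1) 2 = (J : Int) + 1 := by
      have := PySem.Int.floordiv_natCast (2 * J + 2) 2
      have h1 : (2 * J + 2) / 2 = J + 1 := by omega
      rw [h1] at this
      push_cast at this ⊢
      rw [show (2 * (J : Int) + 1 + 1) = 2 * (J : Int) + 2 by ring]
      exact this
    have hfdE : PySem.Int.floordiv (2 * (J : Int) + 2 + 1) 2 = (J : Int) + 1 := by
      have := PySem.Int.floordiv_natCast (2 * J + 3) 2
      have h1 : (2 * J + 3) / 2 = J + 1 := by omega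
      rw [h1] at this
      push_cast at this ⊢
      rw [show (2 * (J : Int) + 2 + 1) = 2 * (J : Int) + 3 by ring]
      exact this
    rw [sucesionPair]
    simp only [List.map_cons, List.map_nil, sucesionTerm, hmodO, hmodE, hfdO, hfdE]
    norm_num

-- ===== VERDICT (by name: the statement is the Claim_ definition above) =====
theorem sucesion_spec : Claim_equal_sucesion := by
  intro n _
  unfold Spec_sucesion
  by_cases h : n ≤ 0
  · rw [sucesion, sucesion_alt, if_pos h, PySem.List.pyRange_one_eq_nil (by omega)]
    rfl
  · push_neg at h
    rw [sucesion, sucesion_alt, if_neg (by omega)]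
    have hm : n = ((n.toNat : Nat) : Int) := by omega
    set m : Nat := n.toNat with hmdef
    have hfd : PySem.Int.floordiv n 2 + 2 = ((m / 2 + 1 : Nat) : Int) + 1 := by
      have h2 := PySem.Int.floordiv_natCast m 2
      push_cast at h2
      rw [hm, h2]
      push_cast; ring
    rw [hfd, pairs_loop (m / 2 + 1)]
    rw [hm, sucesion_loop m]
    dsimp only
    -- truncate the overshooting map to the first n terms
    have hsplit : PySem.List.pyRange 1 (2 * ((↑(m / 2 + 1) : Int)) + 1) 1
        = PySem.List.pyRange 1 ((m : Int) + 1) 1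
          ++ PySem.List.pyRange ((m : Int) + 1) (2 * ((↑(m / 2 + 1) : Int)) + 1) 1 := by
      refine PySem.List.pyRange_one_append 1 ((m : Int) + 1) _ (by omega) ?_
      push_cast; omega
    rw [hsplit, List.map_append, PySem.List.slice_to_natCast]
    have hlen : ((PySem.List.pyRange 1 ((m : Int) + 1) 1).map sucesionTerm).length = n.toNat := by
      rw [List.length_map, PySem.List.length_pyRange_one]
      omega
    rw [List.take_append_of_le_length (by omega), List.take_of_length_le (by omega)]
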